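-- pv_equiv track=rewrite | github.com/allyoushawn/LeetCode | logistic_regression/ref.py | build_voc
-- ===== SOURCE A (Python) =====
-- from collections import defaultdict
--
-- def build_voc(tr):
--     voc = defaultdict(lambda: len(voc))
--     UNK = voc['UNK']
--     for i, data in enumerate(tr):
--         name, gender = data
--         # Unigram
--         for i, c in enumerate(name):
--             voc[c]
--             voc['order-'+c]
--         # Bigram
--         for i, c in enumerate(name):
--             if i == len(name) - 1:
--                 break
--             voc[name[i:i+2]]
--         # Trigram
--         for i, c in enumerate(name):
--             if i == len(name) - 2:
--                 break
--             voc[name[i:i+3]]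
--         if len(name) >= 1:
--             voc[ 'last-letter=' + name[-1]]
--         if len(name) >= 2:
--             voc[ 'last-two-letters=' + name[-2:]]
--         if len(name) >= 3:
--             voc[ 'last-three-letters=' + name[-3:]]
--     voc = defaultdict(lambda: UNK, voc)
--     voc_dim = len(voc)
--     return voc, voc_dim
-- ===== SOURCE B (Python) =====
-- from collections import defaultdict
--
-- def _tokens(name):
--     toks = []
--     for c in name:
--         toks.append(c)
--         toks.append('order-' + c)
--     toks.extend(name[i:i+2] for i in range(len(name) - 1))
--     toks.extend(name[i:i+3] for i in range(len(name) - 2))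
--     if len(name) >= 1:
--         toks.append('last-letter=' + name[-1])
--     if len(name) >= 2:
--         toks.append('last-two-letters=' + name[-2:])
--     if len(name) >= 3:
--         toks.append('last-three-letters=' + name[-3:])
--     return toks
--
-- def build_voc(tr):
--     # ordered token stream: UNK, then each name's features
--     stream = ['UNK']
--     for name, _gender in tr:
--         stream += _tokens(name)
--     # first-occurrence position of every token, with no membership test:
--     # scan back-to-front, letting earlier positions overwrite later ones
--     first = {}
--     for pos, tok in reversed(list(enumerate(stream))):
--         first[tok] = pos
--     # sort the distinct tokens by first occurrence and number them
--     order = sorted(first, key=first.get)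
--     voc = defaultdict(lambda: 0, {tok: i for i, tok in enumerate(order)})
--     return voc, len(voc)
-- ===== Notes on version B (the rewrite author's own statement) =====
-- stated objective: alternative
-- what changed: A assigns ids incrementally through a len-based defaultdict whose lookups mutate it inside four loops; B never tests membership while indexing: it records each token's first position by overwriting back-to-front over the reversed enumerated stream, sorts the distinct tokens by that position, and numbers the sorted list.
import Mathlib
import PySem

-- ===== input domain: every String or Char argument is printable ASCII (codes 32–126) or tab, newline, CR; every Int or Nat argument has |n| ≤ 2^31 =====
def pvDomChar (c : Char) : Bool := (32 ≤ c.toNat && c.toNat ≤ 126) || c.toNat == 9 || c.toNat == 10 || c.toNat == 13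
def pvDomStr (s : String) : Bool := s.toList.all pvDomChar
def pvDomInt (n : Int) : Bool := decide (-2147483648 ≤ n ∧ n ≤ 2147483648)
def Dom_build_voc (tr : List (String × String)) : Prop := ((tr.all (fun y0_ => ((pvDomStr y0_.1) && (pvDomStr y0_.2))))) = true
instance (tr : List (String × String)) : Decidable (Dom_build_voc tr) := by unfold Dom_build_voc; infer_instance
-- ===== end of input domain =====

-- B replaces A's mutating len-based defaultdict lookups by a different indexing algorithm: record each
-- token's first position by overwriting back-to-front over the reversed enumerated stream (no membership
-- test), sort the distinct tokens by that position, and number the sorted list; objective: alternative.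

-- ===== PORT A =====
-- voc[k] on a defaultdict(lambda: len(voc)): inserts len(voc) when k is absent
def pvAccA (d : PySem.Dict String Int) (k : String) : PySem.Dict String Int :=
  if d.contains k then d else d.insert k (d.size : Int)

-- for i, c in enumerate(name): voc[c]; voc['order-'+c]
def pvUniA (l : List (Int × Char)) (d : PySem.Dict String Int) : PySem.Dict String Int :=
  l.foldl (fun d p => pvAccA (pvAccA d (String.ofList [p.2])) ("order-" ++ String.ofList [p.2])) d

-- bigram loop with its break at i == len(name) - 1
def pvBiA (name : List Char) (d : PySem.Dict String Int) : List (Int × Char) → PySem.Dict String Int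
  | [] => d
  | p :: rest =>
      if p.1 == PySem.List.len name - 1 then d
      else pvBiA name (pvAccA d (String.ofList (PySem.List.slice name (some p.1) (some (p.1 + 2))))) rest

-- trigram loop with its break at i == len(name) - 2
def pvTriA (name : List Char) (d : PySem.Dict String Int) : List (Int × Char) → PySem.Dict String Int
  | [] => d
  | p :: rest =>
      if p.1 == PySem.List.len name - 2 then d
      else pvTriA name (pvAccA d (String.ofList (PySem.List.slice name (some p.1) (some (p.1 + 3))))) rest

-- the body of A's main loop, for one (name, gender) pair
def pvNameA (d : PySem.Dict String Int) (name : List Char) : PySem.Dict String Int :=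
  let d := pvUniA (PySem.List.enumerate name) d
  let d := pvBiA name d (PySem.List.enumerate name)
  let d := pvTriA name d (PySem.List.enumerate name)
  let d := if 1 ≤ PySem.List.len name then
             pvAccA d ("last-letter=" ++ String.ofList (PySem.List.slice name (some (-1)) none)) else d
  let d := if 2 ≤ PySem.List.len name then
             pvAccA d ("last-two-letters=" ++ String.ofList (PySem.List.slice name (some (-2)) none)) else d
  if 3 ≤ PySem.List.len name then
    pvAccA d ("last-three-letters=" ++ String.ofList (PySem.List.slice name (some (-3)) none)) else d

def build_voc (tr : List (String × String)) : (List (String × Int)) × Int :=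
  let voc := pvAccA PySem.Dict.empty "UNK"            -- UNK = voc['UNK']
  let voc := tr.foldl (fun d data => pvNameA d data.1.toList) voc
  (voc.items, (voc.size : Int))                       -- voc = defaultdict(lambda: UNK, voc); voc_dim = len(voc)

-- ===== PORT B =====
-- _tokens(name): the ordered feature-token list of one name
def pvTokensB (name : List Char) : List String :=
  let toks := name.flatMap (fun c => [String.ofList [c], "order-" ++ String.ofList [c]])
  let toks := toks ++ (PySem.List.pyRange 0 (PySem.List.len name - 1)).map
      (fun i => String.ofList (PySem.List.slice name (some i) (some (i + 2))))
  let toks := toks ++ (PySem.List.pyRange 0 (PySem.List.len name - 2)).map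
      (fun i => String.ofList (PySem.List.slice name (some i) (some (i + 3))))
  let toks := if 1 ≤ PySem.List.len name then
      toks ++ ["last-letter=" ++ String.ofList (PySem.List.slice name (some (-1)) none)] else toks
  let toks := if 2 ≤ PySem.List.len name then
      toks ++ ["last-two-letters=" ++ String.ofList (PySem.List.slice name (some (-2)) none)] else toks
  if 3 ≤ PySem.List.len name then
      toks ++ ["last-three-letters=" ++ String.ofList (PySem.List.slice name (some (-3)) none)] else toks

def build_voc_alt (tr : List (String × String)) : (List (String × Int)) × Int :=
  let stream := tr.foldl (fun st data => st ++ pvTokensB data.1.toList) ["UNK"]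
  -- for pos, tok in reversed(list(enumerate(stream))): first[tok] = pos
  let first := ((PySem.List.enumerate stream).reverse).foldl
      (fun d p => d.insert p.2 p.1) PySem.Dict.empty
  -- sorted(first, key=first.get); every key of first is present, so first.get is first.getD _ 0 here
  let order := PySem.List.sorted first.keys (fun t => first.getD t 0)
  -- {tok: i for i, tok in enumerate(order)}
  let voc := (PySem.List.enumerate order).foldl
      (fun d p => d.insert p.2 p.1) PySem.Dict.empty
  (voc.items, (voc.size : Int))

-- ===== PRECONDITION & SPEC =====
def Spec_build_voc (tr : List (String × String)) (out : (List (String × Int)) × Int) : Prop := out = build_voc_alt tr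
instance (tr : List (String × String)) (out : (List (String × Int)) × Int) : Decidable (Spec_build_voc tr out) := by unfold Spec_build_voc; infer_instance

-- ===== CLAIM (what is proved, stated in full; the proofs are below) =====
def Claim_equal_build_voc : Prop := ∀ (tr : List (String × String)), Dom_build_voc tr → Spec_build_voc tr (build_voc tr)

-- ===== LEMMAS AND PROOFS =====

-- the dict {tok: i for i, tok in enumerate(l)}
def pvDictOf (l : List String) : PySem.Dict String Int :=
  (PySem.List.enumerate l).foldl (fun d p => d.insert p.2 p.1) PySem.Dict.empty

theorem pvAccA_of_contains (d : PySem.Dict String Int) (k : String)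
    (h : d.contains k = true) : pvAccA d k = d := by
  unfold pvAccA; simp [h]

theorem pvAccA_contains_self (d : PySem.Dict String Int) (k : String) :
    (pvAccA d k).contains k = true := by
  unfold pvAccA; split
  · assumption
  · exact PySem.Dict.contains_insert_self _ _ _

theorem pvAccA_contains_mono (d : PySem.Dict String Int) (k k' : String)
    (h : d.contains k = true) : (pvAccA d k').contains k = true := by
  unfold pvAccA; split
  · exact h
  · rw [PySem.Dict.contains_insert]; simp [h]

-- the unigram loop is the fold of pvAccA over the unigram tokens (index unused)
theorem pvUniA_eq (cs : List Char) (s : Int) (d : PySem.Dict String Int) :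
    pvUniA (PySem.List.enumerate cs s) d
      = (cs.flatMap (fun c => [String.ofList [c], "order-" ++ String.ofList [c]])).foldl pvAccA d := by
  induction cs generalizing s d with
  | nil => simp [pvUniA, PySem.List.enumerate_nil]
  | cons c rest ih =>
      simp only [PySem.List.enumerate_cons, pvUniA, List.foldl_cons, List.flatMap_cons,
        List.foldl_append]
      exact ih (s + 1) _

-- the bigram loop over the suffix of name starting at s is the fold over range(s, len-1)
theorem pvBiA_eq (name cs : List Char) (s : Int) (d : PySem.Dict String Int)
    (hs : 0 ≤ s) (hlen : s + cs.length = (name.length : Int)) :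
    pvBiA name d (PySem.List.enumerate cs s)
      = ((PySem.List.pyRange s ((name.length : Int) - 1)).map
          (fun i => String.ofList (PySem.List.slice name (some i) (some (i + 2))))).foldl pvAccA d := by
  induction cs generalizing s d with
  | nil =>
      rw [PySem.List.pyRange_one_eq_nil (by simp at hlen; omega)]
      simp [pvBiA, PySem.List.enumerate_nil]
  | cons c rest ih =>
      have hlen' : s + rest.length + 1 = (name.length : Int) := by
        simp only [List.length_cons] at hlen; push_cast at hlen ⊢; omega
      rw [PySem.List.enumerate_cons]
      by_cases h : s = (name.length : Int) - 1
      · rw [PySem.List.pyRange_one_eq_nil (le_of_eq h.symm)]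
        simp [pvBiA, PySem.List.len_eq, h]
      · have hlt : s < (name.length : Int) - 1 := by omega
        rw [PySem.List.pyRange_one_cons hlt, List.map_cons, List.foldl_cons]
        simp only [pvBiA, PySem.List.len_eq, beq_iff_eq]
        rw [if_neg h]
        exact ih _ _ (by omega) (by omega)

-- the trigram loop while s ≤ len-2 (the break fires before the list ends)
theorem pvTriA_eq (name cs : List Char) (s : Int) (d : PySem.Dict String Int)
    (hs : 0 ≤ s) (hlen : s + cs.length = (name.length : Int))
    (hsle : s ≤ (name.length : Int) - 2) :
    pvTriA name d (PySem.List.enumerate cs s)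
      = ((PySem.List.pyRange s ((name.length : Int) - 2)).map
          (fun i => String.ofList (PySem.List.slice name (some i) (some (i + 3))))).foldl pvAccA d := by
  induction cs generalizing s d with
  | nil => exfalso; simp at hlen; omega
  | cons c rest ih =>
      have hlen' : s + rest.length + 1 = (name.length : Int) := by
        simp only [List.length_cons] at hlen; push_cast at hlen ⊢; omega
      rw [PySem.List.enumerate_cons]
      by_cases h : s = (name.length : Int) - 2
      · rw [PySem.List.pyRange_one_eq_nil (le_of_eq h.symm)]
        simp [pvTriA, PySem.List.len_eq, h]
      · have hlt : s < (name.length : Int) - 2 := by omega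
        rw [PySem.List.pyRange_one_cons hlt, List.map_cons, List.foldl_cons]
        simp only [pvTriA, PySem.List.len_eq, beq_iff_eq]
        rw [if_neg h]
        exact ih _ _ (by omega) (by omega) (by omega)

-- A's per-name loop body is the fold of pvAccA over that name's token list
theorem pvNameA_eq (name : List Char) (d : PySem.Dict String Int) :
    pvNameA d name = (pvTokensB name).foldl pvAccA d := by
  match name with
  | [] => simp [pvNameA, pvTokensB, pvUniA, pvBiA, pvTriA, PySem.List.enumerate_nil,
      PySem.List.len_eq, PySem.List.pyRange]
  | [c] =>
      -- length-1 name: A's trigram loop re-touches the unigram key name[0:3] = [c] (a no-op),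
      -- B's trigram range(-1) is empty
      have hup : pvUniA [((0 : Int), c)] d
          = pvAccA (pvAccA d (String.ofList [c])) ("order-" ++ String.ofList [c]) := by
        simp [pvUniA]
      have hc : (pvUniA [((0 : Int), c)] d).contains (String.ofList [c]) = true := by
        rw [hup]; exact pvAccA_contains_mono _ _ _ (pvAccA_contains_self d _)
      simp only [pvNameA, pvTokensB, pvBiA, pvTriA, PySem.List.enumerate_cons,
        PySem.List.enumerate_nil, PySem.List.len_eq, List.length_cons, List.length_nil]
      norm_num [PySem.List.pyRange, PySem.List.slice, PySem.List.clampIdx]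
      rw [pvAccA_of_contains _ _ hc, hup]
  | c1 :: c2 :: rest =>
      simp only [pvNameA, pvTokensB, PySem.List.len_eq]
      rw [pvUniA_eq _ 0,
          pvBiA_eq (c1 :: c2 :: rest) (c1 :: c2 :: rest) 0 _ le_rfl (by simp),
          pvTriA_eq (c1 :: c2 :: rest) (c1 :: c2 :: rest) 0 _ le_rfl (by simp) (by simp; omega)]
      split_ifs <;> simp [List.foldl_append]

-- ===== characterisation of A's dict as pvDictOf of the deduped stream =====

theorem pvDictOf_items (l : List String) (hnd : l.Nodup) :
    (pvDictOf l).items = (PySem.List.enumerate l).map (fun p => (p.2, p.1)) := by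
  unfold pvDictOf
  rw [PySem.Dict.items_foldl_insert_fresh (PySem.List.enumerate l) (fun p => p.2) (fun p => p.1)
      PySem.Dict.empty (by intro a _; exact PySem.Dict.contains_empty _)
      (by rw [PySem.List.map_snd_enumerate]; exact hnd)]
  rfl

theorem pvDictOf_keys (l : List String) (hnd : l.Nodup) : (pvDictOf l).keys = l := by
  simp only [PySem.Dict.keys, pvDictOf_items l hnd, List.map_map]
  exact PySem.List.map_snd_enumerate l 0

theorem pvDictOf_size (l : List String) (hnd : l.Nodup) : (pvDictOf l).size = l.length := by
  simp [PySem.Dict.size, pvDictOf_items l hnd, PySem.List.length_enumerate]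

theorem pvDictOf_snoc (l : List String) (t : String) :
    pvDictOf (l ++ [t]) = (pvDictOf l).insert t (l.length : Int) := by
  unfold pvDictOf
  rw [PySem.List.enumerate_append, List.foldl_append]
  simp [PySem.List.enumerate_cons, PySem.List.enumerate_nil]

theorem pvAccA_dictOf (l : List String) (t : String) (hnd : l.Nodup) :
    pvAccA (pvDictOf l) t = pvDictOf (PySem.Set.add l t) := by
  unfold pvAccA
  by_cases hm : t ∈ l
  · rw [if_pos, PySem.Set.add_of_mem hm]
    exact (PySem.Dict.contains_iff_mem_keys _ _).mpr (by rw [pvDictOf_keys l hnd]; exact hm)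
  · rw [if_neg, PySem.Set.add_of_not_mem hm, pvDictOf_snoc, pvDictOf_size l hnd]
    intro hc
    exact hm (by have := (PySem.Dict.contains_iff_mem_keys _ _).mp hc;
                 rwa [pvDictOf_keys l hnd] at this)

theorem pvFoldA_dictOf (s : List String) : ∀ (l : List String), l.Nodup →
    s.foldl pvAccA (pvDictOf l) = pvDictOf (PySem.Set.update l s) := by
  induction s with
  | nil => intro l _; simp [PySem.Set.update_nil]
  | cons t rest ih =>
      intro l hnd
      rw [List.foldl_cons, pvAccA_dictOf l t hnd, PySem.Set.update_cons]
      exact ih _ (PySem.Set.nodup_add l t hnd)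

theorem pvFoldA_empty (s : List String) :
    s.foldl pvAccA PySem.Dict.empty = pvDictOf (PySem.Set.ofList s) := by
  have h0 : pvDictOf [] = PySem.Dict.empty := rfl
  rw [← h0, pvFoldA_dictOf s [] List.nodup_nil, PySem.Set.update_nil_left]

-- ===== characterisation of B's `first` dict and sorted order =====

-- the first match in the enumerated stream is the first occurrence index
theorem pvFind_enumerate (t : String) (s : List String) : ∀ (k : Int),
    (PySem.List.enumerate s k).find? (fun p => p.2 == t)
      = if t ∈ s then some (k + (List.idxOf t s : Int), t) else none := by
  induction s with
  | nil => intro k; simp [PySem.List.enumerate_nil]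
  | cons c rest ih =>
      intro k
      rw [PySem.List.enumerate_cons]
      by_cases hc : c = t
      · subst hc; simp [List.idxOf_cons_self]
      · rw [List.find?_cons_of_neg (by simp [hc]), ih (k + 1)]
        by_cases hm : t ∈ rest
        · rw [if_pos hm, if_pos (by simp [hm]), List.idxOf_cons_ne _ hc]
          simp only [Nat.succ_eq_add_one]
          push_cast; ring_nf
        · rw [if_neg hm, if_neg (by simp [hm, Ne.symm hc])]

-- last-write-wins over the reversed pair list = first match in the original
theorem pvRevFold_get? (L : List (Int × String)) : ∀ (d : PySem.Dict String Int) (t : String),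
    ((L.reverse).foldl (fun d p => d.insert p.2 p.1) d).get? t
      = match L.find? (fun p => p.2 == t) with
        | some p => some p.1
        | none => d.get? t := by
  induction L with
  | nil => intro d t; simp
  | cons x L ih =>
      intro d t
      rw [List.reverse_cons, List.foldl_append]
      simp only [List.foldl_cons, List.foldl_nil]
      rw [PySem.Dict.get?_insert, List.find?_cons]
      by_cases hx : x.2 = t
      · simp [hx]
      · rw [if_neg (fun h => hx h.symm)]
        simpa [show (x.2 == t) = false from by simp [hx]] using ih d t

-- first occurrences in order are pairwise increasing in idxOf
theorem pvOfList_pairwise_idxOf (s : List String) :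
    (PySem.Set.ofList s).Pairwise (fun a b => List.idxOf a s < List.idxOf b s) := by
  induction s with
  | nil => simp [PySem.Set.ofList_nil]
  | cons x xs ih =>
      rw [PySem.Set.ofList_cons]
      constructor
      · intro b hb
        obtain ⟨hbmem, hbne⟩ := (PySem.Set.mem_discard _ _ _).mp hb
        rw [List.idxOf_cons_self, List.idxOf_cons_ne _ hbne.symm]
        exact Nat.succ_pos _
      · have hsub : ((PySem.Set.ofList xs).discard x).Sublist (PySem.Set.ofList xs) :=
          List.filter_sublist
        refine (ih.sublist hsub).imp_of_mem ?_
        intro a b ha hb hab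
        have hax : a ≠ x := ((PySem.Set.mem_discard _ _ _).mp ha).2
        have hbx : b ≠ x := ((PySem.Set.mem_discard _ _ _).mp hb).2
        rw [List.idxOf_cons_ne _ hax.symm, List.idxOf_cons_ne _ hbx.symm]
        exact Nat.succ_lt_succ hab

-- ===== VERDICT (by name: the statement is the Claim_ definition above) =====
theorem build_voc_spec : Claim_equal_build_voc := by
  intro tr _
  unfold Spec_build_voc build_voc build_voc_alt
  dsimp only
  -- both sides reduce to the same token stream
  set stream : List String := "UNK" :: tr.flatMap (fun data => pvTokensB data.1.toList) with hstream
  have hsB : tr.foldl (fun st data => st ++ pvTokensB data.1.toList) ["UNK"] = stream := by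
    rw [PySem.List.foldl_append_eq_flatMap]; rfl
  -- A's dict is the fold of pvAccA over the stream
  have hA : tr.foldl (fun d data => pvNameA d data.1.toList) (pvAccA PySem.Dict.empty "UNK")
      = pvDictOf (PySem.Set.ofList stream) := by
    have hbody : (fun (d : PySem.Dict String Int) (data : String × String) => pvNameA d data.1.toList)
        = (fun acc data => (pvTokensB data.1.toList).foldl pvAccA acc) := by
      funext d data; exact pvNameA_eq data.1.toList d
    rw [hbody, ← List.foldl_flatMap, ← List.foldl_cons, ← hstream, pvFoldA_empty]
  rw [hA, hsB]
  -- B's `first`: keys are the distinct tokens (of the reversed stream), values the first positions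
  set first : PySem.Dict String Int := ((PySem.List.enumerate stream).reverse).foldl
      (fun d p => d.insert p.2 p.1) PySem.Dict.empty with hfirst
  have hkeys : first.keys = PySem.Set.ofList stream.reverse := by
    rw [hfirst, PySem.Dict.keys_foldl_insert_key ((PySem.List.enumerate stream).reverse)
          (fun p => p.2) (fun d p => p.1) PySem.Dict.empty]
    simp only [PySem.Dict.keys_empty, List.map_reverse, PySem.List.map_snd_enumerate]
    exact PySem.Set.update_nil_left _
  have hget : ∀ t ∈ stream, first.get? t = some ((List.idxOf t stream : Nat) : Int) := by
    intro t ht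
    rw [hfirst, pvRevFold_get? (PySem.List.enumerate stream) PySem.Dict.empty t,
        pvFind_enumerate t stream 0, if_pos ht]
    simp
  -- sorting the keys by first position recovers first-occurrence order
  have horder : PySem.List.sorted first.keys (fun t => first.getD t 0) = PySem.Set.ofList stream := by
    apply PySem.List.sorted_eq_of_perm_of_pairwise_lt
    · rw [hkeys]
      rw [List.perm_ext_iff_of_nodup (PySem.Set.nodup_ofList _) (PySem.Set.nodup_ofList _)]
      intro a
      rw [PySem.Set.mem_ofList, PySem.Set.mem_ofList, List.mem_reverse]
    · refine (pvOfList_pairwise_idxOf stream).imp_of_mem (fun {a b} ha hb hab => ?_)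
      have ha' : a ∈ stream := (PySem.Set.mem_ofList _ _).mp ha
      have hb' : b ∈ stream := (PySem.Set.mem_ofList _ _).mp hb
      rw [PySem.Dict.getD_eq_get?_getD, PySem.Dict.getD_eq_get?_getD, hget a ha', hget b hb']
      simpa using hab
  rw [horder]
  rfl
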